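-- pv_equiv track=rewrite | github.com/SamiFatmi/Advent-of-code | 2023/01_part2.py | get_line_digits
-- ===== SOURCE A (Python) =====
-- def get_line_digits(line):
--     digits = ''
--     for i, y in enumerate(line) :
--         try :
--             digits += str(int(y))
--         except :
--             for j, digit_string in enumerate(['one','two','three','four','five','six','seven','eight','nine']):
--                 if line[i:i+len(digit_string)] == digit_string :
--                     digits += ['1','2','3','4','5','6','7','8','9'][j]
--
--     return digits
-- ===== SOURCE B (Python) =====
-- import re
--
-- _TOKEN = re.compile(r'(?=([0-9]|one|two|three|four|five|six|seven|eight|nine))')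
-- _WORD_TO_DIGIT = {'one': '1', 'two': '2', 'three': '3', 'four': '4', 'five': '5',
--                   'six': '6', 'seven': '7', 'eight': '8', 'nine': '9'}
--
--
-- def get_line_digits(line):
--     tokens = _TOKEN.findall(line)
--     return ''.join(_WORD_TO_DIGIT.get(t, t) for t in tokens)
-- ===== Notes on version B (the rewrite author's own statement) =====
-- stated objective: faster
-- what changed: Replaces A's interleaved per-character try/except int() probe with nested slice comparisons by a staged pipeline: one regex findall with an overlapping lookahead alternation collects all digit/word tokens, then a separate mapping pass converts each token via a word-to-digit dict and joins.
import Mathlib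
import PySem

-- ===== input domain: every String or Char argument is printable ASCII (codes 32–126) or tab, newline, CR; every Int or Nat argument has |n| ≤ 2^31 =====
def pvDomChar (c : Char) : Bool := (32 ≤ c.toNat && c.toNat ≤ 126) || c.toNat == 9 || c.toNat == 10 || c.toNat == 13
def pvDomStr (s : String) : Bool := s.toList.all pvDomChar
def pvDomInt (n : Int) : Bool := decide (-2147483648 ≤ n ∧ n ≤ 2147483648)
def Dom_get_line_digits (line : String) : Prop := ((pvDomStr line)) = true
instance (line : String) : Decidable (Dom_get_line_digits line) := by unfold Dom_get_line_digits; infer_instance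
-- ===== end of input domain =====

-- B replaces A's interleaved per-character try/except scan with a staged pipeline: a regex-style
-- overlapping tokenizer (first-matching alternative at each position) producing the token list,
-- then a separate mapping pass word->digit joined at the end (objective: faster, measured).

-- ===== PORT A =====
def pvWordsA : List (List Char) :=
  [['o','n','e'],['t','w','o'],['t','h','r','e','e'],['f','o','u','r'],['f','i','v','e'],
   ['s','i','x'],['s','e','v','e','n'],['e','i','g','h','t'],['n','i','n','e']]
def pvDigitsA : List Char := ['1','2','3','4','5','6','7','8','9']

def get_line_digits (line : String) : String :=
  String.ofList ((PySem.List.enumerate line.toList 0).foldl (fun digits iy =>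
    match PySem.Int.ofChars? [iy.2] with
    | some n => digits ++ PySem.Int.toChars n
    | none =>
      (PySem.List.enumerate pvWordsA 0).foldl (fun digits jw =>
        if PySem.Chars.slice line.toList (some iy.1) (some (iy.1 + (jw.2.length : Int))) = jw.2
        then digits ++ [PySem.List.pyGetD pvDigitsA jw.1 ' ']   -- index always in range; ' ' never used
        else digits) digits) [])

-- ===== PORT B =====
-- the regex alternation ([0-9]|one|two|...|nine): first alternative matching at this position
def pvAltsB : List (List Char) :=
  [['o','n','e'],['t','w','o'],['t','h','r','e','e'],['f','o','u','r'],['f','i','v','e'],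
   ['s','i','x'],['s','e','v','e','n'],['e','i','g','h','t'],['n','i','n','e']]

def pvMapB : List (List Char × Char) :=
  [(['o','n','e'],'1'),(['t','w','o'],'2'),(['t','h','r','e','e'],'3'),(['f','o','u','r'],'4'),
   (['f','i','v','e'],'5'),(['s','i','x'],'6'),(['s','e','v','e','n'],'7'),
   (['e','i','g','h','t'],'8'),(['n','i','n','e'],'9')]

def pvTokenAt : List Char → Option (List Char)
  | [] => none
  | c :: rest =>
    if '0' ≤ c ∧ c ≤ '9' then some [c]
    else pvAltsB.findSome? (fun w => if PySem.Chars.startswith (c :: rest) w then some w else none)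

-- stage 1: re.findall with the zero-width lookahead — every position yields its token (if any)
def pvTokens : List Char → List (List Char)
  | [] => []
  | c :: rest =>
    match pvTokenAt (c :: rest) with
    | some t => t :: pvTokens rest
    | none => pvTokens rest

-- stage 2: _WORD_TO_DIGIT.get(t, t)
def pvMapTok (t : List Char) : List Char :=
  match pvMapB.lookup t with
  | some d => [d]
  | none => t

def get_line_digits_alt (line : String) : String :=
  String.ofList (((pvTokens line.toList).map pvMapTok).flatten)

-- ===== PRECONDITION & SPEC =====
def Spec_get_line_digits (line : String) (out : String) : Prop := out = get_line_digits_alt line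
instance (line : String) (out : String) : Decidable (Spec_get_line_digits line out) := by unfold Spec_get_line_digits; infer_instance

-- ===== CLAIM (what is proved, stated in full; the proofs are below) =====
def Claim_equal_get_line_digits : Prop := ∀ (line : String), Dom_get_line_digits line → Spec_get_line_digits line (get_line_digits line)

-- ===== LEMMAS AND PROOFS =====

-- what one position contributes to B's output
def pvStepB (c : Char) (rest : List Char) : List Char :=
  match pvTokenAt (c :: rest) with
  | some t => pvMapTok t
  | none => []

def pvOutB (l : List Char) : List Char := ((pvTokens l).map pvMapTok).flatten

theorem pvOutB_cons (c : Char) (rest : List Char) :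
    pvOutB (c :: rest) = pvStepB c rest ++ pvOutB rest := by
  simp only [pvOutB, pvTokens, pvStepB]
  cases pvTokenAt (c :: rest) <;> simp

theorem pvNondigit_none (c : Char) (hle : c.toNat ≤ 126)
    (hd : ¬('0' ≤ c ∧ c ≤ '9')) : PySem.Int.ofChars? [c] = none := by
  obtain ⟨n, hn, rfl⟩ : ∃ n, n ≤ 126 ∧ c = Char.ofNat n := ⟨c.toNat, hle, (Char.ofNat_toNat c).symm⟩
  revert hd
  interval_cases n <;> decide

theorem pvTakeEq (w rest : List Char) (n : Nat) (hn : n = w.length) :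
    (List.take n rest = w) ↔ w <+: rest := by
  subst hn; rw [List.prefix_iff_eq_take]; exact eq_comm

theorem pvMapTok_one : pvMapTok ['o','n','e'] = ['1'] := rfl
theorem pvMapTok_two : pvMapTok ['t','w','o'] = ['2'] := rfl
theorem pvMapTok_three : pvMapTok ['t','h','r','e','e'] = ['3'] := rfl
theorem pvMapTok_four : pvMapTok ['f','o','u','r'] = ['4'] := rfl
theorem pvMapTok_five : pvMapTok ['f','i','v','e'] = ['5'] := rfl
theorem pvMapTok_six : pvMapTok ['s','i','x'] = ['6'] := rfl
theorem pvMapTok_seven : pvMapTok ['s','e','v','e','n'] = ['7'] := rfl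
theorem pvMapTok_eight : pvMapTok ['e','i','g','h','t'] = ['8'] := rfl
theorem pvMapTok_nine : pvMapTok ['n','i','n','e'] = ['9'] := rfl

-- the per-position agreement of the two programs
theorem pvStepA_eq (c : Char) (rest acc : List Char) (hdom : pvDomChar c = true) :
    (match PySem.Int.ofChars? [c] with
     | some n => acc ++ PySem.Int.toChars n
     | none =>
       (PySem.List.enumerate pvWordsA 0).foldl (fun digits jw =>
         if List.take jw.2.length (c :: rest) = jw.2
         then digits ++ [PySem.List.pyGetD pvDigitsA jw.1 ' ']
         else digits) acc)
    = acc ++ pvStepB c rest := by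
  by_cases hd : '0' ≤ c ∧ c ≤ '9'
  · obtain ⟨h1, h2⟩ := hd
    have hl : 48 ≤ c.toNat := Nat.succ_le_of_lt h1
    have hr : c.toNat ≤ 57 := Fin.mk_le_mk.mp h2
    obtain ⟨n, hn1, hn2, rfl⟩ : ∃ n, 48 ≤ n ∧ n ≤ 57 ∧ c = Char.ofNat n :=
      ⟨c.toNat, hl, hr, (Char.ofNat_toNat c).symm⟩
    interval_cases n <;> rfl
  · have hle : c.toNat ≤ 126 := by simp [pvDomChar] at hdom; omega
    rw [pvNondigit_none c hle hd]
    simp only [pvStepB, pvTokenAt, if_neg hd]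
    by_cases hco : c = 'o'
    · subst hco
      by_cases h1 : ['n','e'] <+: rest <;>
        simp [pvWordsA, pvDigitsA, pvAltsB, pvMapTok_one, pvMapTok_two, pvMapTok_three, pvMapTok_four, pvMapTok_five, pvMapTok_six, pvMapTok_seven, pvMapTok_eight, pvMapTok_nine, List.findSome?, PySem.List.enumerate,
          PySem.List.pyGetD, PySem.Chars.startswith, List.isPrefixOf_iff_prefix,
          List.cons_prefix_cons, h1, pvTakeEq ['n','e'] _ 2 rfl]
    by_cases hct : c = 't'
    · subst hct
      by_cases h1 : ['w','o'] <+: rest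
      · obtain ⟨t, rfl⟩ := h1
        have h2 : ¬ (['h','r','e','e'] <+: ('w'::'o'::t)) := by simp [List.cons_prefix_cons]
        simp [pvWordsA, pvDigitsA, pvAltsB, pvMapTok_one, pvMapTok_two, pvMapTok_three, pvMapTok_four, pvMapTok_five, pvMapTok_six, pvMapTok_seven, pvMapTok_eight, pvMapTok_nine, List.findSome?, PySem.List.enumerate,
          PySem.List.pyGetD, PySem.Chars.startswith, List.isPrefixOf_iff_prefix,
          List.cons_prefix_cons, h2, pvTakeEq ['w','o'] _ 2 rfl, pvTakeEq ['h','r','e','e'] _ 4 rfl]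
      · by_cases h2 : ['h','r','e','e'] <+: rest <;>
        simp [pvWordsA, pvDigitsA, pvAltsB, pvMapTok_one, pvMapTok_two, pvMapTok_three, pvMapTok_four, pvMapTok_five, pvMapTok_six, pvMapTok_seven, pvMapTok_eight, pvMapTok_nine, List.findSome?, PySem.List.enumerate,
          PySem.List.pyGetD, PySem.Chars.startswith, List.isPrefixOf_iff_prefix,
          List.cons_prefix_cons, h1, h2, pvTakeEq ['w','o'] _ 2 rfl, pvTakeEq ['h','r','e','e'] _ 4 rfl]
    by_cases hcf : c = 'f'
    · subst hcf
      by_cases h1 : ['o','u','r'] <+: rest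
      · obtain ⟨t, rfl⟩ := h1
        have h2 : ¬ (['i','v','e'] <+: ('o'::'u'::'r'::t)) := by simp [List.cons_prefix_cons]
        simp [pvWordsA, pvDigitsA, pvAltsB, pvMapTok_one, pvMapTok_two, pvMapTok_three, pvMapTok_four, pvMapTok_five, pvMapTok_six, pvMapTok_seven, pvMapTok_eight, pvMapTok_nine, List.findSome?, PySem.List.enumerate,
          PySem.List.pyGetD, PySem.Chars.startswith, List.isPrefixOf_iff_prefix,
          List.cons_prefix_cons, h2, pvTakeEq ['o','u','r'] _ 3 rfl, pvTakeEq ['i','v','e'] _ 3 rfl]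
      · by_cases h2 : ['i','v','e'] <+: rest <;>
        simp [pvWordsA, pvDigitsA, pvAltsB, pvMapTok_one, pvMapTok_two, pvMapTok_three, pvMapTok_four, pvMapTok_five, pvMapTok_six, pvMapTok_seven, pvMapTok_eight, pvMapTok_nine, List.findSome?, PySem.List.enumerate,
          PySem.List.pyGetD, PySem.Chars.startswith, List.isPrefixOf_iff_prefix,
          List.cons_prefix_cons, h1, h2, pvTakeEq ['o','u','r'] _ 3 rfl, pvTakeEq ['i','v','e'] _ 3 rfl]
    by_cases hcs : c = 's'
    · subst hcs
      by_cases h1 : ['i','x'] <+: rest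
      · obtain ⟨t, rfl⟩ := h1
        have h2 : ¬ (['e','v','e','n'] <+: ('i'::'x'::t)) := by simp [List.cons_prefix_cons]
        simp [pvWordsA, pvDigitsA, pvAltsB, pvMapTok_one, pvMapTok_two, pvMapTok_three, pvMapTok_four, pvMapTok_five, pvMapTok_six, pvMapTok_seven, pvMapTok_eight, pvMapTok_nine, List.findSome?, PySem.List.enumerate,
          PySem.List.pyGetD, PySem.Chars.startswith, List.isPrefixOf_iff_prefix,
          List.cons_prefix_cons, h2, pvTakeEq ['i','x'] _ 2 rfl, pvTakeEq ['e','v','e','n'] _ 4 rfl]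
      · by_cases h2 : ['e','v','e','n'] <+: rest <;>
        simp [pvWordsA, pvDigitsA, pvAltsB, pvMapTok_one, pvMapTok_two, pvMapTok_three, pvMapTok_four, pvMapTok_five, pvMapTok_six, pvMapTok_seven, pvMapTok_eight, pvMapTok_nine, List.findSome?, PySem.List.enumerate,
          PySem.List.pyGetD, PySem.Chars.startswith, List.isPrefixOf_iff_prefix,
          List.cons_prefix_cons, h1, h2, pvTakeEq ['i','x'] _ 2 rfl, pvTakeEq ['e','v','e','n'] _ 4 rfl]
    by_cases hce : c = 'e'
    · subst hce
      by_cases h1 : ['i','g','h','t'] <+: rest <;>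
        simp [pvWordsA, pvDigitsA, pvAltsB, pvMapTok_one, pvMapTok_two, pvMapTok_three, pvMapTok_four, pvMapTok_five, pvMapTok_six, pvMapTok_seven, pvMapTok_eight, pvMapTok_nine, List.findSome?, PySem.List.enumerate,
          PySem.List.pyGetD, PySem.Chars.startswith, List.isPrefixOf_iff_prefix,
          List.cons_prefix_cons, h1, pvTakeEq ['i','g','h','t'] _ 4 rfl]
    by_cases hcn : c = 'n'
    · subst hcn
      by_cases h1 : ['i','n','e'] <+: rest <;>
        simp [pvWordsA, pvDigitsA, pvAltsB, pvMapTok_one, pvMapTok_two, pvMapTok_three, pvMapTok_four, pvMapTok_five, pvMapTok_six, pvMapTok_seven, pvMapTok_eight, pvMapTok_nine, List.findSome?, PySem.List.enumerate,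
          PySem.List.pyGetD, PySem.Chars.startswith, List.isPrefixOf_iff_prefix,
          List.cons_prefix_cons, h1, pvTakeEq ['i','n','e'] _ 3 rfl]
    · have hco' : ¬'o' = c := fun h => hco h.symm
      have hct' : ¬'t' = c := fun h => hct h.symm
      have hcf' : ¬'f' = c := fun h => hcf h.symm
      have hcs' : ¬'s' = c := fun h => hcs h.symm
      have hce' : ¬'e' = c := fun h => hce h.symm
      have hcn' : ¬'n' = c := fun h => hcn h.symm
      simp [pvStepB, pvWordsA, pvDigitsA, pvAltsB, List.findSome?, PySem.List.enumerate,
        PySem.Chars.startswith, List.isPrefixOf_iff_prefix, List.cons_prefix_cons,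
        hco, hct, hcf, hcs, hce, hcn, hco', hct', hcf', hcs', hce', hcn']

-- A's fold over the suffix starting at position pre.length produces B's output for that suffix
theorem pvFoldA (suf : List Char) : ∀ (pre acc : List Char), suf.all pvDomChar = true →
    ((PySem.List.enumerate suf ((pre.length : Nat) : Int)).foldl (fun digits iy =>
      match PySem.Int.ofChars? [iy.2] with
      | some n => digits ++ PySem.Int.toChars n
      | none =>
        (PySem.List.enumerate pvWordsA 0).foldl (fun digits jw =>
          if PySem.Chars.slice (pre ++ suf) (some iy.1) (some (iy.1 + (jw.2.length : Int))) = jw.2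
          then digits ++ [PySem.List.pyGetD pvDigitsA jw.1 ' ']
          else digits) digits) acc)
    = acc ++ pvOutB suf := by
  induction suf with
  | nil => intro pre acc _; simp [PySem.List.enumerate, pvOutB, pvTokens]
  | cons c rest ih =>
    intro pre acc hall
    simp only [List.all_cons, Bool.and_eq_true] at hall
    rw [PySem.List.enumerate_cons, List.foldl_cons]
    have hsl : ∀ (w : List Char),
        PySem.Chars.slice (pre ++ c :: rest) (some ((pre.length : Nat) : Int))
          (some (((pre.length : Nat) : Int) + (w.length : Int))) = List.take w.length (c :: rest) := by
      intro w
      rw [PySem.Chars.slice_eq_listSlice, PySem.List.slice_natCast_add, List.drop_left]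
    simp only [hsl]
    have hhead := pvStepA_eq c rest acc hall.1
    simp only [hhead]
    have hlen : ((pre.length : Nat) : Int) + 1 = (((pre ++ [c]).length : Nat) : Int) := by
      simp
    have happ : pre ++ c :: rest = (pre ++ [c]) ++ rest := by simp
    rw [hlen, happ, ih (pre ++ [c]) (acc ++ pvStepB c rest) hall.2, pvOutB_cons, List.append_assoc]

-- ===== VERDICT (by name: the statement is the Claim_ definition above) =====
theorem get_line_digits_spec : Claim_equal_get_line_digits := by
  intro line hdom
  unfold Spec_get_line_digits get_line_digits get_line_digits_alt
  exact congrArg String.ofList (pvFoldA line.toList [] [] hdom)
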